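-- pv_equiv track=rewrite | github.com/StanVas/Fundamentals_with_Python_May_2022 | fundamentals/03_exercises_friday/15_functions_exercise/08_palindrome_integers.py | palindrome_nums
-- ===== SOURCE A (Python) =====
-- def palindrome_nums(nums):
--     palindrome_lst = []
--     for current_num in nums:
--         if current_num == current_num[::-1]:
--             palindrome_lst.append(True)
--         else:
--             palindrome_lst.append(False)
--     return palindrome_lst
-- ===== SOURCE B (Python) =====
-- def palindrome_nums(nums):
--     palindrome_lst = []
--     for current_num in nums:
--         i = 0
--         j = len(current_num) - 1
--         is_pal = True
--         while i < j:
--             if current_num[i] != current_num[j]: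
--                 is_pal = False
--                 break
--             i += 1
--             j -= 1
--         palindrome_lst.append(is_pal)
--     return palindrome_lst
-- ===== Notes on version B (the rewrite author's own statement) =====
-- stated objective: alternative
-- what changed: Replaces building a reversed copy of each string and comparing whole strings with an in-place two-pointer symmetric scan that stops at the first mismatching pair.
import Mathlib
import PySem

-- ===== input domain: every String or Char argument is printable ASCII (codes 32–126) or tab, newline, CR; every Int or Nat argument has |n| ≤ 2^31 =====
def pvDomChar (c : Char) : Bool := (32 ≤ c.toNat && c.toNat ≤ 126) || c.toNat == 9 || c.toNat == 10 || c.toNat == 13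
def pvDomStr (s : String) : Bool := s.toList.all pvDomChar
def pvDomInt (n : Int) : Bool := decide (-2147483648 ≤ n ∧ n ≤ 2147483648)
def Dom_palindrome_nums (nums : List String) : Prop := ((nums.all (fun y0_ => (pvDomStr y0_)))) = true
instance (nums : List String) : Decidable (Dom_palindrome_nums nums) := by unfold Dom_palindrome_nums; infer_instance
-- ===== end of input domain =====

-- B replaces the reversed-copy comparison with a two-pointer symmetric scan (alternative decomposition, same cost).

-- ===== PORT A =====
-- for current_num in nums: append (current_num == current_num[::-1]); s[::-1] is PySem.Str.slice? s none none (-1) (always some)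
def palindrome_nums (nums : List String) : List Bool :=
  nums.foldl (fun palindrome_lst current_num =>
    if current_num == (PySem.Str.slice? current_num none none (-1)).getD "" then
      palindrome_lst ++ [true]
    else
      palindrome_lst ++ [false]) []

-- ===== PORT B =====
-- the while i < j loop of Source B; Python's indices i, j stay inside 0..len-1 whenever
-- the body reads them, so Nat indexing with a default character is exact here
def pvTpLoop (l : List Char) (i j : Nat) : Bool :=
  if _h : i < j then
    if l.getD i ' ' ≠ l.getD j ' ' then false
    else pvTpLoop l (i + 1) (j - 1)
  else true
termination_by j - i

def palindrome_nums_alt (nums : List String) : List Bool :=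
  nums.foldl (fun palindrome_lst current_num =>
    palindrome_lst ++ [pvTpLoop current_num.toList 0 (current_num.toList.length - 1)]) []

-- ===== PRECONDITION & SPEC =====
def Spec_palindrome_nums (nums : List String) (out : List Bool) : Prop := out = palindrome_nums_alt nums
instance (nums : List String) (out : List Bool) : Decidable (Spec_palindrome_nums nums out) := by unfold Spec_palindrome_nums; infer_instance

-- ===== CLAIM (what is proved, stated in full; the proofs are below) =====
def Claim_equal_palindrome_nums : Prop := ∀ (nums : List String), Dom_palindrome_nums nums → Spec_palindrome_nums nums (palindrome_nums nums)

-- ===== LEMMAS AND PROOFS =====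

-- the two-pointer loop accepts iff every strictly-left-of-middle position matches its mirror (sum i+j is invariant)
theorem pvTpLoop_iff (l : List Char) : ∀ (n i j : Nat), j - i = n →
    (pvTpLoop l i j = true ↔ ∀ p, i ≤ p → 2*p < i + j → l.getD p ' ' = l.getD (i+j-p) ' ') := by
  intro n
  induction n using Nat.strong_induction_on with
  | _ n ih =>
    intro i j hn
    rw [pvTpLoop.eq_def]
    by_cases h : i < j
    · rw [dif_pos h]
      by_cases hc : l.getD i ' ' = l.getD j ' '
      · rw [if_neg (not_not_intro hc)]
        rw [ih (j-1-(i+1)) (by omega) (i+1) (j-1) rfl]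
        constructor
        · intro hall p hp hlt
          rcases Nat.eq_or_lt_of_le hp with heq | hgt
          · have e2 : i + j - p = j := by omega
            rw [e2, ← heq]; exact hc
          · have e : (i+1) + (j-1) = i + j := by omega
            have := hall p (by omega) (by omega)
            rwa [e] at this
        · intro hall p hp hlt
          have e : (i+1) + (j-1) = i + j := by omega
          rw [e]
          exact hall p (by omega) (by omega)
      · rw [if_pos hc]
        simp only [Bool.false_eq_true, false_iff]
        intro hall
        have : i + j - i = j := by omega
        exact hc (this ▸ hall i le_rfl (by omega))
    · rw [dif_neg h]
      constructor
      · intro _ p hp hlt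
        exact absurd hlt (by omega)
      · intro _; rfl

-- the half-scan condition characterises palindromes
theorem pvPal_iff (l : List Char) :
    (∀ p, 2*p < l.length - 1 → l.getD p ' ' = l.getD (l.length - 1 - p) ' ') ↔ l = l.reverse := by
  constructor
  · intro h
    apply List.ext_getElem (by simp)
    intro p h1 h2
    rw [List.getElem_reverse]
    rcases lt_trichotomy (2*p) (l.length - 1) with hlt | heq | hgt
    · have := h p hlt
      rw [List.getD_eq_getElem l ' ' h1, List.getD_eq_getElem l ' ' (by omega)] at this
      exact this
    · have e : l.length - 1 - p = p := by omega
      simp only [e]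
    · have hq : 2*(l.length - 1 - p) < l.length - 1 := by omega
      have := h _ hq
      have e : l.length - 1 - (l.length - 1 - p) = p := by omega
      rw [e] at this
      rw [List.getD_eq_getElem l ' ' (by omega), List.getD_eq_getElem l ' ' h1] at this
      exact this.symm
  · intro h p hp
    have h1 : p < l.length := by omega
    have h2 : l.length - 1 - p < l.length := by omega
    have hq : l[p]? = l.reverse[p]? := by rw [← h]
    rw [List.getElem?_reverse h1] at hq
    rw [List.getD_eq_getElem l ' ' h1, List.getD_eq_getElem l ' ' h2]
    simpa [List.getElem?_eq_getElem, h1, h2] using hq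

-- per-element agreement: A's reversed-copy comparison equals B's two-pointer scan
theorem pvPerElem (s : String) :
    (s == (PySem.Str.slice? s none none (-1)).getD "") =
      pvTpLoop s.toList 0 (s.toList.length - 1) := by
  have hiff : pvTpLoop s.toList 0 (s.toList.length - 1) = true ↔ s.toList = s.toList.reverse := by
    rw [pvTpLoop_iff s.toList (s.toList.length - 1) 0 (s.toList.length - 1) rfl]
    simpa using pvPal_iff s.toList
  have h1 : pvTpLoop s.toList 0 (s.toList.length - 1)
      = decide (s.toList = s.toList.reverse) :=
    (Bool.decide_coe _).symm.trans (decide_eq_decide.mpr hiff)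
  rw [h1, PySem.Str.slice?_none_none_neg_one, Option.getD_some, Bool.eq_iff_iff]
  simp only [beq_iff_eq, decide_eq_true_eq]
  rw [← String.toList_inj, String.toList_ofList]

-- ===== VERDICT (by name: the statement is the Claim_ definition above) =====
theorem palindrome_nums_spec : Claim_equal_palindrome_nums := by
  intro nums _
  unfold Spec_palindrome_nums palindrome_nums palindrome_nums_alt
  congr 1
  funext acc s
  rw [← pvPerElem s]
  cases hb : (s == (PySem.Str.slice? s none none (-1)).getD "") <;> simp
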